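-- pv_equiv track=rewrite | github.com/Kushagraw12/Competitive-Programming | Codeforces/Global round/s.py | MEX
-- ===== SOURCE A (Python) =====
-- def MEX(a, m):
--     counter = 0
--     for i in range(1, len(a)):
--         if m in a:
--             continue
--         else:
--             if i < max(a):
--                 counter += 1
--     if counter == 0:
--         return 0, counter
--     else:
--         return 1, counter
-- ===== SOURCE B (Python) =====
-- def MEX(a, m):
--     # O(n): one membership scan and one max scan, then a closed-form count
--     # instead of A's loop that re-scans a for m and max(a) at every index.
--     if len(a) < 2 or m in a:
--         return 0, 0
--     c = min(len(a) - 1, max(a) - 1)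
--     return (1, c) if c > 0 else (0, 0)
-- ===== Notes on version B (the rewrite author's own statement) =====
-- stated objective: faster
-- what changed: Replaced the loop that re-evaluates 'm in a' and 'max(a)' on every index with one membership test, one max scan, and the closed-form count min(len(a)-1, max(a)-1) clamped at 0.
import Mathlib
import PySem

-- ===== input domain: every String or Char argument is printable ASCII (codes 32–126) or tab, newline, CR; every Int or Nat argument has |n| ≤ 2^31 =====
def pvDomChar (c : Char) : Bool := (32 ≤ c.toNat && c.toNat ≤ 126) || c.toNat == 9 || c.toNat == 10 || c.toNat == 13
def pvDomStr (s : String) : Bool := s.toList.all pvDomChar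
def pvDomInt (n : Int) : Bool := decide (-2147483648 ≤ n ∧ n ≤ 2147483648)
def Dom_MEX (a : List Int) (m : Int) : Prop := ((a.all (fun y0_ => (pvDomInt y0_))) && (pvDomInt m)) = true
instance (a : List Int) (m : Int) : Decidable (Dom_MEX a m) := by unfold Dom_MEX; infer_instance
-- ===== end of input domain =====

-- B replaces A's loop (which re-scans a for 'm in a' and max(a) at every index) by one
-- membership test, one max, and the closed-form count min(len(a)-1, max(a)-1) clamped at 0.

-- ===== PORT A =====
-- max(a) is only evaluated by Python when the loop runs, i.e. len(a) ≥ 2, so a is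
-- nonempty there and the .getD 0 default is never the value Python observes.
def MEX (a : List Int) (m : Int) : Int × Int :=
  let counter : Int :=
    (PySem.List.pyRange 1 (a.length : Int) 1).foldl
      (fun counter i =>
        if m ∈ a then counter
        else if i < (PySem.List.max? a (fun y => y)).getD 0 then counter + 1
        else counter) 0
  if counter = 0 then (0, counter) else (1, counter)

-- ===== PORT B =====
def MEX_alt (a : List Int) (m : Int) : Int × Int :=
  if (a.length : Int) < 2 ∨ m ∈ a then (0, 0)
  else
    let c : Int := min ((a.length : Int) - 1) ((PySem.List.max? a (fun y => y)).getD 0 - 1)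
    if c > 0 then (1, c) else (0, 0)

-- ===== PRECONDITION & SPEC =====
def Spec_MEX (a : List Int) (m : Int) (out : Int × Int) : Prop := out = MEX_alt a m
instance (a : List Int) (m : Int) (out : Int × Int) : Decidable (Spec_MEX a m out) := by unfold Spec_MEX; infer_instance

-- ===== CLAIM (what is proved, stated in full; the proofs are below) =====
def Claim_equal_MEX : Prop := ∀ (a : List Int) (m : Int), Dom_MEX a m → Spec_MEX a m (MEX a m)

-- ===== LEMMAS AND PROOFS =====

-- A's counting loop in closed form: counting i ∈ [1, n) with i < M gives
-- min(n-1, M-1) clamped at 0.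
lemma cnt_eq (M : Int) : ∀ n : Nat,
    (PySem.List.pyRange 1 (n : Int) 1).foldl
      (fun c i => if i < M then c + 1 else c) 0
    = max 0 (min ((n : Int) - 1) (M - 1)) := by
  intro n
  induction n with
  | zero => simp [PySem.List.pyRange_one_eq_nil]
  | succ n ih =>
    rcases Nat.eq_zero_or_pos n with h0 | hpos
    · subst h0
      rw [show ((1 : Nat) : Int) = 1 by norm_num,
        PySem.List.pyRange_one_eq_nil (by norm_num)]
      simp
    · have h1 : (1 : Int) ≤ (n : Int) := by exact_mod_cast hpos
      rw [show ((n + 1 : Nat) : Int) = (n : Int) + 1 by push_cast; ring,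
        PySem.List.pyRange_one_succ_right h1, List.foldl_append]
      simp only [List.foldl_cons, List.foldl_nil]
      rw [ih]
      split_ifs <;> omega

theorem MEX_spec : Claim_equal_MEX := by
  intro a m _
  unfold Spec_MEX
  by_cases hm : m ∈ a
  · simp [MEX, MEX_alt, hm]
  · simp only [MEX, MEX_alt, hm, if_false, or_false]
    rw [cnt_eq]
    set M : Int := (PySem.List.max? a (fun y => y)).getD 0 with hM
    set L : Int := (a.length : Int) with hL
    by_cases hc : 0 < min (L - 1) (M - 1)
    · rw [if_neg (show ¬ (L < 2) by omega), if_pos hc,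
        show max 0 (min (L - 1) (M - 1)) = min (L - 1) (M - 1) by omega,
        if_neg (show ¬ (min (L - 1) (M - 1) = 0) by omega)]
    · rw [show max 0 (min (L - 1) (M - 1)) = 0 by omega, if_pos rfl]
      split_ifs <;> rfl

-- ===== VERDICT (by name: the statement is the Claim_ definition above) =====
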